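-- pv_equiv track=rewrite | github.com/sinisacoh/wfbase | wfbase.py | _find_1_to_1_map_from_left_to_right
-- ===== SOURCE A (Python) =====
-- def _find_1_to_1_map_from_left_to_right(left, right):
--     if len(left) != len(right):
--         return None
--     given_left_return_right = {}
--     for i in range(len(left)):
--         l = left[i]
--         r = right[i]
--         if l in given_left_return_right.keys():
--             if given_left_return_right[l] != r:
--                 return None
--         else:
--             given_left_return_right[l] = r
--     return given_left_return_right
-- ===== SOURCE B (Python) =====
-- def _find_1_to_1_map_from_left_to_right(left, right):
--     if len(left) != len(right):
--         return None
--     mapping = {}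
--     pairs = list(zip(left, right))
--     while pairs:
--         l, r = pairs[0]
--         if any(k == l and v != r for k, v in pairs):
--             return None
--         mapping[l] = r
--         pairs = [(k, v) for k, v in pairs if k != l]
--     return mapping
-- ===== Notes on version B (the rewrite author's own statement) =====
-- stated objective: alternative
-- what changed: Replaces A's hash-membership single pass with a group-extraction worklist: repeatedly take the first remaining pair (l, r), verify by a scan that every occurrence of key l carries value r, record l -> r, and filter all pairs with key l out of the worklist; no membership lookup in the mapping is ever made.
import Mathlib
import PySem

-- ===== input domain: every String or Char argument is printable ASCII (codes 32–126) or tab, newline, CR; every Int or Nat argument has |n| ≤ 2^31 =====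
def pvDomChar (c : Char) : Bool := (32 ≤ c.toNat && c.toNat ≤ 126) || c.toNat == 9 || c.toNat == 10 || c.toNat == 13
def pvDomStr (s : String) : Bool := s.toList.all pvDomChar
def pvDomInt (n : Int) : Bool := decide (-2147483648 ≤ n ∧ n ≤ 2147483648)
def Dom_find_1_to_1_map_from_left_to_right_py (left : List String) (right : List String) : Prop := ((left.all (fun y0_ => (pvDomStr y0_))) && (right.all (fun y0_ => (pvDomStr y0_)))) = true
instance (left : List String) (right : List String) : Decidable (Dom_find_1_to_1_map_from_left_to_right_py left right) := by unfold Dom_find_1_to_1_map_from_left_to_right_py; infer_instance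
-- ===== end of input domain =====

-- B replaces A's hash-membership single pass by a group-extraction worklist (scan-verify each
-- key group, then filter it out); objective: a genuinely different algorithm, not faster.


-- ===== PORT A =====
-- the for-i loop of A, walking the two (equal-length) lists in step with the accumulated dict
def pvALoop : List String → List String → PySem.Dict String String →
    Option (PySem.Dict String String)
  | [], _, d => some d
  | _ :: _, [], d => some d
  | l :: ls, r :: rs, d =>
    if d.contains l then
      if d.getD l "" ≠ r then none else pvALoop ls rs d
    else pvALoop ls rs (d.insert l r)

def find_1_to_1_map_from_left_to_right_py (left : List String) (right : List String) :
    Option (List (String × String)) :=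
  if left.length ≠ right.length then none
  else (pvALoop left right PySem.Dict.empty).map (fun d => d.items)

-- ===== PORT B =====
-- B's while loop: take the first remaining pair (l, r), scan-verify every occurrence of key l
-- carries value r, record l → r, filter key l out of the worklist.
def pvBLoop : List (String × String) → PySem.Dict String String →
    Option (PySem.Dict String String)
  | [], m => some m
  | (l, r) :: rest, m =>
    if ((l, r) :: rest).any (fun q => q.1 == l && !(q.2 == r)) then none
    else pvBLoop (((l, r) :: rest).filter (fun q => q.1 ≠ l)) (m.insert l r)
  termination_by ps _ => ps.length
  decreasing_by
    refine Nat.lt_succ_of_le ?_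
    simp only [List.filter_cons]
    rw [if_neg (by simp)]
    exact List.length_filter_le _ _

def find_1_to_1_map_from_left_to_right_py_alt (left : List String) (right : List String) :
    Option (List (String × String)) :=
  if left.length ≠ right.length then none
  else (pvBLoop (left.zip right) PySem.Dict.empty).map (fun m => m.items)

-- ===== PRECONDITION & SPEC =====
def Spec_find_1_to_1_map_from_left_to_right_py (left : List String) (right : List String) (out : Option (List (String × String))) : Prop := out = find_1_to_1_map_from_left_to_right_py_alt left right
instance (left : List String) (right : List String) (out : Option (List (String × String))) : Decidable (Spec_find_1_to_1_map_from_left_to_right_py left right out) := by unfold Spec_find_1_to_1_map_from_left_to_right_py; infer_instance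

-- ===== CLAIM (what is proved, stated in full; the proofs are below) =====
def Claim_equal_find_1_to_1_map_from_left_to_right_py : Prop := ∀ (left : List String) (right : List String), Dom_find_1_to_1_map_from_left_to_right_py left right → Spec_find_1_to_1_map_from_left_to_right_py left right (find_1_to_1_map_from_left_to_right_py left right)

-- ===== LEMMAS AND PROOFS =====

-- pairwise variant of A's loop, and its agreement with the two-list form
def pvALoopP : List (String × String) → PySem.Dict String String →
    Option (PySem.Dict String String)
  | [], d => some d
  | p :: ps, d =>
    if d.contains p.1 then
      if d.getD p.1 "" ≠ p.2 then none else pvALoopP ps d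
    else pvALoopP ps (d.insert p.1 p.2)

theorem pvALoop_eq_zip : ∀ (ls rs : List String) (d : PySem.Dict String String),
    pvALoop ls rs d = pvALoopP (ls.zip rs) d
  | [], _, d => by cases ‹List String› <;> rfl
  | _ :: _, [], d => rfl
  | l :: ls, r :: rs, d => by
    simp only [pvALoop, List.zip_cons_cons, pvALoopP]
    split_ifs <;> first | rfl | exact pvALoop_eq_zip ls rs _

-- all pairs with the same key carry the same value
def pvConsistent (ps : List (String × String)) : Prop :=
  ∀ p ∈ ps, ∀ q ∈ ps, p.1 = q.1 → p.2 = q.2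

-- the dict d does not contradict any pair of ps
def pvCompat (d : PySem.Dict String String) (ps : List (String × String)) : Prop :=
  ∀ p ∈ ps, ∀ v, d.get? p.1 = some v → v = p.2

-- the result both loops converge to: first occurrence of each key, in order
def pvFirstMap : List (String × String) → List (String × String)
  | [] => []
  | (l, r) :: ps => (l, r) :: pvFirstMap (ps.filter (fun q => q.1 ≠ l))
  termination_by ps => ps.length
  decreasing_by
    refine Nat.lt_succ_of_le ?_
    first
    | exact le_trans (List.length_filter_le _ _) (by simp)
    | (simp only [List.length_unattach]
       exact le_trans (List.length_filter_le _ _) (by simp))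

theorem pv_get?_eq_some_getD (d : PySem.Dict String String) (k : String)
    (h : d.contains k = true) : d.get? k = some (d.getD k "") := by
  rw [PySem.Dict.contains_eq_isSome_get?] at h
  cases hg : d.get? k with
  | none => rw [hg] at h; simp at h
  | some v => rw [PySem.Dict.getD_of_get?_eq_some d "" hg]

theorem pv_insert_self_eq (d : PySem.Dict String String) (k v : String)
    (hnd : d.keys.Nodup) (hg : d.get? k = some v) : d.insert k v = d := by
  apply PySem.Dict.ext
  have hc : d.contains k = true := by
    rw [PySem.Dict.contains_eq_isSome_get?, hg]; rfl
  rw [PySem.Dict.items_insert_of_contains d v hc]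
  have hmem := PySem.Dict.mem_items_of_get?_eq_some d hg
  conv_rhs => rw [show d.items = d.items.map id from (List.map_id d.items).symm]
  apply List.map_congr_left
  intro p hp
  by_cases hpk : p.1 = k
  · have : p = (k, v) := by
      have := PySem.Dict.get?_of_mem_items d (k := p.1) (v := p.2) (by simpa using hp) hnd
      rw [hpk, hg] at this
      obtain ⟨k1, v1⟩ := p
      simp_all
    simp [this]
  · simp [hpk]

-- A's loop succeeds and produces exactly the foldl-insert dict, under consistency
theorem pvALoopP_some : ∀ (ps : List (String × String)) (d : PySem.Dict String String),
    d.keys.Nodup → pvConsistent ps → pvCompat d ps →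
    pvALoopP ps d = some (ps.foldl (fun d p => d.insert p.1 p.2) d)
  | [], d, _, _, _ => rfl
  | p :: ps, d, hnd, hcons, hcomp => by
    simp only [pvALoopP, List.foldl_cons]
    by_cases hc : d.contains p.1 = true
    · have hg := pv_get?_eq_some_getD d p.1 hc
      have hv : d.getD p.1 "" = p.2 := hcomp p (by simp) _ hg
      have hins : (d.insert p.1 p.2) = d := pv_insert_self_eq d p.1 p.2 hnd (by rw [hg, hv])
      rw [if_pos hc, if_neg (by simp [hv]), hins]
      exact pvALoopP_some ps d hnd
        (fun a ha b hb => hcons a (by simp [ha]) b (by simp [hb]))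
        (fun a ha v hv' => hcomp a (by simp [ha]) v hv')
    · rw [if_neg hc]
      exact pvALoopP_some ps ((d.insert p.1 p.2))
        (PySem.Dict.nodup_keys_insert d p.1 p.2 hnd)
        (fun a ha b hb => hcons a (by simp [ha]) b (by simp [hb]))
        (by
          intro a ha v hv'
          by_cases hk : a.1 = p.1
          · have : v = p.2 := by
              rw [hk, PySem.Dict.get?_insert_self] at hv'
              exact (Option.some.inj hv').symm
            rw [this]
            exact hcons p (by simp) a (by simp [ha]) hk.symm
          · rw [PySem.Dict.get?_insert_of_ne d p.2 hk] at hv'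
            exact hcomp a (by simp [ha]) v hv')

-- A's loop fails when consistency (with the accumulator) fails
theorem pvALoopP_none : ∀ (ps : List (String × String)) (d : PySem.Dict String String),
    ¬ (pvConsistent ps ∧ pvCompat d ps) → pvALoopP ps d = none
  | [], d, h => absurd ⟨fun p hp => absurd hp (List.not_mem_nil), fun p hp => absurd hp List.not_mem_nil⟩ h
  | p :: ps, d, h => by
    simp only [pvALoopP]
    by_cases hc : d.contains p.1 = true
    · have hg := pv_get?_eq_some_getD d p.1 hc
      by_cases hv : d.getD p.1 "" = p.2
      · rw [if_pos hc, if_neg (by simp [hv])]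
        apply pvALoopP_none
        rintro ⟨hcons, hcomp⟩
        apply h
        constructor
        · intro a ha b hb hk
          rcases List.mem_cons.mp ha with ha | ha <;> rcases List.mem_cons.mp hb with hb | hb
          · rw [ha, hb]
          · rw [ha]; rw [ha] at hk
            have := hcomp b hb (d.getD p.1 "") (by rw [← hk]; exact hg)
            rw [hv] at this; exact this
          · rw [hb]; rw [hb] at hk
            have := hcomp a ha (d.getD p.1 "") (by rw [hk]; exact hg)
            rw [hv] at this; exact this.symm
          · exact hcons a ha b hb hk
        · intro a ha v hv'
          rcases List.mem_cons.mp ha with ha | ha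
          · rw [ha] at hv' ⊢; rw [hg] at hv'
            rw [← Option.some.inj hv', hv]
          · exact hcomp a ha v hv'
      · rw [if_pos hc, if_pos (by simp [hv])]
    · rw [if_neg hc]
      apply pvALoopP_none
      rintro ⟨hcons, hcomp⟩
      apply h
      constructor
      · intro a ha b hb hk
        rcases List.mem_cons.mp ha with ha | ha <;> rcases List.mem_cons.mp hb with hb | hb
        · rw [ha, hb]
        · rw [ha]; rw [ha] at hk
          have := hcomp b hb p.2 (by rw [hk, PySem.Dict.get?_insert_self])
          exact this
        · rw [hb]; rw [hb] at hk
          exact (hcomp a ha p.2 (by rw [← hk, PySem.Dict.get?_insert_self])).symm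
        · exact hcons a ha b hb hk
      · intro a ha v hv'
        rcases List.mem_cons.mp ha with ha | ha
        · rw [ha] at hv' ⊢
          have : d.contains p.1 = true := by
            rw [PySem.Dict.contains_eq_isSome_get?, hv']; rfl
          exact absurd this hc
        · by_cases hk : a.1 = p.1
          · have hcp : d.contains a.1 = true := by
              rw [PySem.Dict.contains_eq_isSome_get?, hv']; rfl
            rw [hk] at hcp; exact absurd hcp hc
          · exact hcomp a ha v (by rw [PySem.Dict.get?_insert_of_ne d p.2 hk, hv'])

-- items of the foldl-insert dict, under consistency: the start dict's items plus the
-- first occurrence of each fresh key, in order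
theorem pv_items_foldl : ∀ (ps : List (String × String)) (d : PySem.Dict String String),
    d.keys.Nodup → pvConsistent ps → pvCompat d ps →
    (ps.foldl (fun d p => d.insert p.1 p.2) d).items
      = d.items ++ pvFirstMap (ps.filter (fun p => ¬ d.contains p.1))
  | [], d, _, _, _ => by simp [pvFirstMap]
  | p :: ps, d, hnd, hcons, hcomp => by
    simp only [List.foldl_cons, List.filter_cons]
    by_cases hc : d.contains p.1 = true
    · have hg := pv_get?_eq_some_getD d p.1 hc
      have hv : d.getD p.1 "" = p.2 := hcomp p (by simp) _ hg
      have hins : (d.insert p.1 p.2) = d := pv_insert_self_eq d p.1 p.2 hnd (by rw [hg, hv])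
      rw [hins]
      have hb : decide (¬ d.contains p.1 = true) = false := by simp [hc]
      rw [hb]
      exact pv_items_foldl ps d hnd
        (fun a ha b hb => hcons a (by simp [ha]) b (by simp [hb]))
        (fun a ha v hv' => hcomp a (by simp [ha]) v hv')
    · have hb : decide (¬ d.contains p.1 = true) = true := by simp [hc]
      rw [hb]
      have hrec := pv_items_foldl ps (d.insert p.1 p.2)
        (PySem.Dict.nodup_keys_insert d p.1 p.2 hnd)
        (fun a ha b hb => hcons a (by simp [ha]) b (by simp [hb]))
        (by
          intro a ha v hv'
          by_cases hk : a.1 = p.1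
          · have : v = p.2 := by
              rw [hk, PySem.Dict.get?_insert_self] at hv'
              exact (Option.some.inj hv').symm
            rw [this]
            exact hcons p (by simp) a (by simp [ha]) hk.symm
          · rw [PySem.Dict.get?_insert_of_ne d p.2 hk] at hv'
            exact hcomp a (by simp [ha]) v hv')
      rw [hrec, PySem.Dict.items_insert_of_not_contains d p.2 (by simpa using hc)]
      have hfe : ps.filter (fun q => ¬ (d.insert p.1 p.2).contains q.1)
          = (ps.filter (fun q => ¬ d.contains q.1)).filter (fun q => q.1 ≠ p.1) := by
        rw [List.filter_filter]
        apply List.filter_congr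
        intro q _
        rw [PySem.Dict.contains_insert]
        by_cases hk : q.1 = p.1 <;> simp [hk, hc]
      rw [hfe]
      obtain ⟨l, r⟩ := p
      rw [if_pos rfl]
      rw [show pvFirstMap ((l, r) :: ps.filter (fun q => ¬ d.contains q.1))
            = (l, r) :: pvFirstMap ((ps.filter (fun q => ¬ d.contains q.1)).filter
                (fun q => q.1 ≠ l)) from by rw [pvFirstMap]]
      simp

-- B's scan check, as a proposition
theorem pv_any_eq_false_iff (ps : List (String × String)) (l r : String) :
    (ps.any (fun q => q.1 == l && !(q.2 == r)) = false) ↔ ∀ q ∈ ps, q.1 = l → q.2 = r := by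
  rw [List.any_eq_false]
  constructor
  · intro h q hq hk
    by_contra hne
    exact h q hq (by simp [hk, hne])
  · intro h q hq
    by_cases hk : q.1 = l
    · simp [h q hq hk]
    · simp [hk]

-- consistency is preserved by filtering
theorem pv_consistent_filter (ps : List (String × String)) (f : String × String → Prop)
    [DecidablePred f] (h : pvConsistent ps) : pvConsistent (ps.filter (fun q => f q)) :=
  fun a ha b hb => h a (List.mem_of_mem_filter ha) b (List.mem_of_mem_filter hb)

-- B's loop succeeds on consistent worklists whose keys are fresh for the accumulator
theorem pvBLoop_some : ∀ (ps : List (String × String)) (m : PySem.Dict String String),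
    pvConsistent ps → (∀ p ∈ ps, m.contains p.1 = false) →
    pvBLoop ps m = some (PySem.Dict.mk (m.items ++ pvFirstMap ps))
  | [], m, _, _ => by simp [pvBLoop, pvFirstMap]
  | (l, r) :: ps, m, hcons, hfresh => by
    rw [pvBLoop]
    have hchk : (((l, r) :: ps).any (fun q => q.1 == l && !(q.2 == r)) = false) :=
      (pv_any_eq_false_iff _ l r).mpr
        (fun q hq hk => hcons q hq (l, r) (by simp) hk)
    rw [hchk]
    simp only [Bool.false_eq_true, if_false]
    have hfc : ((l, r) :: ps).filter (fun q => q.1 ≠ l) = ps.filter (fun q => q.1 ≠ l) := by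
      simp
    rw [hfc]
    have hml : m.contains l = false := hfresh (l, r) (by simp)
    have hrec := pvBLoop_some (ps.filter (fun q => q.1 ≠ l)) (m.insert l r)
      (pv_consistent_filter ps _ (fun a ha b hb => hcons a (by simp [ha]) b (by simp [hb])))
      (by
        intro q hq
        have hk : q.1 ≠ l := by simpa using (List.of_mem_filter hq)
        rw [PySem.Dict.contains_insert]
        have : (q.1 == l) = false := beq_eq_false_iff_ne.mpr hk
        rw [this]
        simpa using hfresh q (by simp [List.mem_of_mem_filter hq]))
    rw [hrec, PySem.Dict.items_insert_of_not_contains m r hml]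
    rw [show pvFirstMap ((l, r) :: ps) = (l, r) :: pvFirstMap (ps.filter (fun q => q.1 ≠ l))
          from by rw [pvFirstMap]]
    rw [List.append_assoc]
    rfl
  termination_by ps _ => ps.length
  decreasing_by
    refine Nat.lt_succ_of_le ?_
    exact le_trans (List.length_filter_le _ _) (by simp)

-- B's loop fails on inconsistent worklists
theorem pvBLoop_none : ∀ (ps : List (String × String)) (m : PySem.Dict String String),
    ¬ pvConsistent ps → pvBLoop ps m = none
  | [], m, h => absurd (fun p hp => absurd hp List.not_mem_nil) h
  | (l, r) :: ps, m, h => by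
    rw [pvBLoop]
    by_cases hchk : (((l, r) :: ps).any (fun q => q.1 == l && !(q.2 == r))) = true
    · rw [hchk]; rfl
    · have hall := (pv_any_eq_false_iff _ l r).mp (Bool.eq_false_iff.mpr hchk)
      rw [Bool.eq_false_iff.mpr hchk]
      simp only [Bool.false_eq_true, if_false]
      apply pvBLoop_none
      intro hcf
      apply h
      intro a ha b hb hk
      by_cases hal : a.1 = l
      · rw [hall a ha hal, hall b hb (hk ▸ hal)]
      · have hbl : b.1 ≠ l := fun hbl => hal (hk ▸ hbl)
        have ha' : a ∈ ((l, r) :: ps).filter (fun q => q.1 ≠ l) :=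
          List.mem_filter.mpr ⟨ha, by simpa using hal⟩
        have hb' : b ∈ ((l, r) :: ps).filter (fun q => q.1 ≠ l) :=
          List.mem_filter.mpr ⟨hb, by simpa using hbl⟩
        exact hcf a ha' b hb' hk
  termination_by ps _ => ps.length
  decreasing_by
    refine Nat.lt_succ_of_le ?_
    simp only [List.filter_cons]
    rw [if_neg (by simp)]
    exact List.length_filter_le _ _

-- ===== VERDICT (by name: the statement is the Claim_ definition above) =====
theorem find_1_to_1_map_from_left_to_right_py_spec : Claim_equal_find_1_to_1_map_from_left_to_right_py := by
  intro left right _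
  unfold Spec_find_1_to_1_map_from_left_to_right_py
  unfold find_1_to_1_map_from_left_to_right_py find_1_to_1_map_from_left_to_right_py_alt
  by_cases hlen : left.length ≠ right.length
  · rw [if_pos hlen, if_pos hlen]
  · rw [if_neg hlen, if_neg hlen, pvALoop_eq_zip]
    set ps := left.zip right with hps
    by_cases hcons : pvConsistent ps
    · have hcompat : pvCompat PySem.Dict.empty ps :=
        fun p _ v hv => by rw [PySem.Dict.get?_empty] at hv; exact absurd hv (by simp)
      rw [pvALoopP_some ps PySem.Dict.empty PySem.Dict.nodup_keys_empty hcons hcompat]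
      have hfresh : ∀ p ∈ ps, (PySem.Dict.empty : PySem.Dict String String).contains p.1 = false :=
        fun p _ => by simp [PySem.Dict.contains_empty]
      rw [pvBLoop_some ps PySem.Dict.empty hcons hfresh]
      have hfilt : ps.filter
          (fun p => ¬ (PySem.Dict.empty : PySem.Dict String String).contains p.1 = true) = ps := by
        apply List.filter_eq_self.mpr
        intro p _
        simp [PySem.Dict.contains_empty]
      simp only [Option.map_some]
      rw [pv_items_foldl ps PySem.Dict.empty PySem.Dict.nodup_keys_empty hcons hcompat, hfilt]
    · rw [pvALoopP_none ps PySem.Dict.empty (fun h => hcons h.1)]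
      rw [pvBLoop_none ps PySem.Dict.empty hcons]
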